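-- pv_equiv track=rewrite | github.com/ernestvmo/AdventOfCode | 2017/day_04/AoC.py | policy_2
-- ===== SOURCE A (Python) =====
-- def policy_2(passphrases: list[str]):
--     valid_count = 0
--     for passphrase in passphrases:
--         valid = True
--         for w1 in passphrase:
--             if passphrase.count(w1) > 1:
--                 valid = False
--             else:
--                 for w2 in passphrase:
--                     if w1 != w2 and sorted(w1) == sorted(w2):
--                         valid = False
--         if valid:
--             valid_count += 1
--     return valid_count
-- ===== SOURCE B (Python) =====
-- def policy_2(passphrases: list[str]):
--     valid_count = 0
--     for passphrase in passphrases: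
--         s = sorted(passphrase)
--         ok = True
--         for i in range(1, len(s)):
--             if s[i - 1] == s[i]:
--                 ok = False
--                 break
--         if ok:
--             valid_count += 1
--     return valid_count
-- ===== Notes on version B (the rewrite author's own statement) =====
-- stated objective: faster
-- what changed: Replaces A's per-character passphrase.count scan (plus a redundant inner pairwise loop over single characters) with sort-then-adjacent-duplicate scan per passphrase.
import Mathlib
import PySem

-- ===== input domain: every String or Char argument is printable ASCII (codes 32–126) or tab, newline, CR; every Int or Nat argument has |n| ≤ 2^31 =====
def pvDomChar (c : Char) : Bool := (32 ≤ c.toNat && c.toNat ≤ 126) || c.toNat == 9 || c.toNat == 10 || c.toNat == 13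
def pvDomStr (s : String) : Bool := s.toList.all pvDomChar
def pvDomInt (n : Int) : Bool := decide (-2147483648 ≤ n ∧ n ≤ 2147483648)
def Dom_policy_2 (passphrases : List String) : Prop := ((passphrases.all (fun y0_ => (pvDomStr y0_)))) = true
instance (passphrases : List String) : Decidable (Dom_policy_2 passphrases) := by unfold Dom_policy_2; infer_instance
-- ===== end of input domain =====

-- B replaces A's quadratic per-character count scan with sort + adjacent-duplicate scan per passphrase (measured faster at scale).


-- ===== PORT A =====
def policy_2 (passphrases : List String) : Int :=
  passphrases.foldl (fun valid_count passphrase =>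
    let cs := passphrase.toList
    let valid :=
      cs.foldl (fun valid w1 =>
        if PySem.List.count cs w1 > 1 then false
        else
          cs.foldl (fun valid w2 =>
            if w1 ≠ w2 ∧
               PySem.List.sorted [w1] (fun x => x) false =
               PySem.List.sorted [w2] (fun x => x) false then false
            else valid) valid) true
    if valid then valid_count + 1 else valid_count) 0

-- ===== PORT B =====
-- the adjacent scan with early exit (for i in range(1, len(s)): if s[i-1] == s[i]: ok = False; break)
def pvNoAdj : List Char → Bool
  | a :: b :: t => if a = b then false else pvNoAdj (b :: t)
  | _ => true

def policy_2_alt (passphrases : List String) : Int :=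
  passphrases.foldl (fun valid_count passphrase =>
    let s := PySem.List.sorted passphrase.toList (fun x => x) false
    if pvNoAdj s then valid_count + 1 else valid_count) 0

-- ===== PRECONDITION & SPEC =====
def Spec_policy_2 (passphrases : List String) (out : Int) : Prop := out = policy_2_alt passphrases
instance (passphrases : List String) (out : Int) : Decidable (Spec_policy_2 passphrases out) := by unfold Spec_policy_2; infer_instance

-- ===== CLAIM (what is proved, stated in full; the proofs are below) =====
def Claim_equal_policy_2 : Prop := ∀ (passphrases : List String), Dom_policy_2 passphrases → Spec_policy_2 passphrases (policy_2 passphrases)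

-- ===== LEMMAS AND PROOFS =====
theorem pvSortedSingleton (a : Char) : PySem.List.sorted [a] (fun x => x) false = [a] := by
  apply PySem.List.sorted_eq_self_of_pairwise
  simp

theorem pvInnerId (w1 : Char) (l : List Char) (v : Bool) :
    l.foldl (fun valid w2 =>
      if w1 ≠ w2 ∧
         PySem.List.sorted [w1] (fun x => x) false =
         PySem.List.sorted [w2] (fun x => x) false then false
      else valid) v = v := by
  induction l generalizing v with
  | nil => rfl
  | cons x t ih =>
    rw [List.foldl_cons]
    have hcond : ¬ (w1 ≠ x ∧
        PySem.List.sorted [w1] (fun x => x) false =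
        PySem.List.sorted [x] (fun x => x) false) := by
      rintro ⟨h1, h2⟩
      rw [pvSortedSingleton, pvSortedSingleton] at h2
      exact h1 (by simpa using h2)
    rw [if_neg hcond]
    exact ih v

theorem pvFoldAnd (p : Char → Bool) (l : List Char) (b : Bool) :
    l.foldl (fun v w => v && p w) b = (b && l.all p) := by
  induction l generalizing b with
  | nil => simp
  | cons x t ih => simp [ih, Bool.and_assoc]

theorem pvMidFold (cs : List Char) (l : List Char) (b : Bool) :
    l.foldl (fun valid w1 =>
      if PySem.List.count cs w1 > 1 then false
      else
        cs.foldl (fun valid w2 =>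
          if w1 ≠ w2 ∧
             PySem.List.sorted [w1] (fun x => x) false =
             PySem.List.sorted [w2] (fun x => x) false then false
          else valid) valid) b
    = (b && l.all (fun w1 => decide (List.count w1 cs ≤ 1))) := by
  have hf : (fun (valid : Bool) (w1 : Char) =>
      if PySem.List.count cs w1 > 1 then false
      else
        cs.foldl (fun valid w2 =>
          if w1 ≠ w2 ∧
             PySem.List.sorted [w1] (fun x => x) false =
             PySem.List.sorted [w2] (fun x => x) false then false
          else valid) valid)
      = (fun (valid : Bool) (w1 : Char) => valid && decide (List.count w1 cs ≤ 1)) := by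
    funext v w1
    rw [pvInnerId]
    by_cases h : PySem.List.count cs w1 > 1
    · have hc : ¬ List.count w1 cs ≤ 1 := by rw [PySem.List.count_eq] at h; omega
      simp [hc]
    · have hc : List.count w1 cs ≤ 1 := by rw [PySem.List.count_eq] at h; omega
      simp [hc]
  rw [hf, pvFoldAnd]

theorem pvAllCountIff (cs : List Char) :
    (cs.all (fun w1 => decide (List.count w1 cs ≤ 1)) = true) ↔ cs.Nodup := by
  simp only [List.all_eq_true, decide_eq_true_eq, List.nodup_iff_count_le_one]
  constructor
  · intro h a
    by_cases ha : a ∈ cs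
    · exact h a ha
    · simp [List.count_eq_zero_of_not_mem ha]
  · intro h a _
    exact h a

theorem pvNoAdjIff : ∀ (s : List Char), s.Pairwise (· ≤ ·) → (pvNoAdj s = true ↔ s.Nodup)
  | [] => by intro _; simp [pvNoAdj]
  | [a] => by intro _; simp [pvNoAdj]
  | a :: b :: t => by
    intro hp
    have htail : (b :: t).Pairwise (· ≤ ·) := hp.of_cons
    have ih := pvNoAdjIff (b :: t) htail
    by_cases hab : a = b
    · simp [pvNoAdj, hab]
    · have hale : ∀ x ∈ b :: t, a ≤ x := fun x hx => (List.pairwise_cons.mp hp).1 x hx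
      have hanotin : a ∉ b :: t := by
        intro hmem
        rcases List.mem_cons.mp hmem with h | h
        · exact hab h
        · have hab' : a ≤ b := hale b (by simp)
          have hba : b ≤ a := (List.pairwise_cons.mp htail).1 a h
          exact hab (le_antisymm hab' hba)
      simp [pvNoAdj, hab, ih, List.nodup_cons, hanotin]

theorem pvPerString (p : String) :
    (p.toList.foldl (fun valid w1 =>
      if PySem.List.count p.toList w1 > 1 then false
      else
        p.toList.foldl (fun valid w2 =>
          if w1 ≠ w2 ∧
             PySem.List.sorted [w1] (fun x => x) false =
             PySem.List.sorted [w2] (fun x => x) false then false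
          else valid) valid) true)
    = pvNoAdj (PySem.List.sorted p.toList (fun x => x) false) := by
  have hperm := PySem.List.sorted_perm p.toList (fun x => x) false
  have hpw : (PySem.List.sorted p.toList (fun x => x) false).Pairwise (· ≤ ·) :=
    PySem.List.sorted_pairwise p.toList (fun x => x)
  rw [pvMidFold, Bool.true_and]
  apply Bool.eq_iff_iff.mpr
  rw [pvAllCountIff, pvNoAdjIff _ hpw, hperm.nodup_iff]

theorem pvFoldlExt (l : List String) (a : Int) :
    l.foldl (fun valid_count passphrase =>
      let cs := passphrase.toList
      let valid :=
        cs.foldl (fun valid w1 =>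
          if PySem.List.count cs w1 > 1 then false
          else
            cs.foldl (fun valid w2 =>
              if w1 ≠ w2 ∧
                 PySem.List.sorted [w1] (fun x => x) false =
                 PySem.List.sorted [w2] (fun x => x) false then false
              else valid) valid) true
      if valid then valid_count + 1 else valid_count) a
    = l.foldl (fun valid_count passphrase =>
      let s := PySem.List.sorted passphrase.toList (fun x => x) false
      if pvNoAdj s then valid_count + 1 else valid_count) a := by
  simp only [pvPerString]

-- ===== VERDICT (by name: the statement is the Claim_ definition above) =====
theorem policy_2_spec : Claim_equal_policy_2 := by
  intro ps _
  unfold Spec_policy_2 policy_2 policy_2_alt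
  exact pvFoldlExt ps 0
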